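-- pv_equiv track=rewrite | github.com/lfernando123/tire-scheduling-digital-twin | optimization/ga.py | zigzag_score
-- ===== SOURCE A (Python) =====
-- def zigzag_score(lines, pattern):
--
--     score = 0
--
--     expected = []
--
--     while len(expected) < len(lines):
--         expected.extend(pattern)
--
--     expected = expected[:len(lines)]
--
--     for i in range(len(lines)):
--
--         if lines[i].lower() == expected[i]:
--             score += 1
--         else:
--             score -= 1
--
--     return score
-- ===== SOURCE B (Python) =====
-- def zigzag_score(lines, pattern):
--     total = 0
--     while lines:
--         for a, b in zip(lines, pattern):
--             total += 1 if a.lower() == b else -1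
--         lines = lines[len(pattern):]
--     return total
-- ===== Notes on version B (the rewrite author's own statement) =====
-- stated objective: alternative
-- what changed: Instead of materialising a repeated 'expected' table and comparing index by index, B consumes the input chunk-wise: it repeatedly zips the remaining lines directly against the pattern (zip truncates the last partial chunk for free) and slices off one pattern-length chunk per iteration, with no index arithmetic and no table.
import Mathlib
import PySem

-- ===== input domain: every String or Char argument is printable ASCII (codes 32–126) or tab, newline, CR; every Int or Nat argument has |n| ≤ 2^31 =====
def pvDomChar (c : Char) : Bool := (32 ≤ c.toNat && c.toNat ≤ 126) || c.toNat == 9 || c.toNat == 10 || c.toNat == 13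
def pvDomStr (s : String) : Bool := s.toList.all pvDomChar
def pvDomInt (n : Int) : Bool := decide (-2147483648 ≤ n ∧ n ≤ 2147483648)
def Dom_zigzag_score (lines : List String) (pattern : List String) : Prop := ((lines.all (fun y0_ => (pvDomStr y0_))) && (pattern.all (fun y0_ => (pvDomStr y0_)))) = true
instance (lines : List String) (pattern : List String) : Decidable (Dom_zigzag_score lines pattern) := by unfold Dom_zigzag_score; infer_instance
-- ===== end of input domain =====

-- B drops A's repeated 'expected' table and index comparison: it consumes the lines chunk-wise,
-- zipping the remaining lines against the pattern and slicing off one chunk per round (alternative decomposition).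

-- ===== PORT A =====
-- Python's 'while len(expected) < len(lines): expected.extend(pattern)'. It diverges iff
-- pattern = [] and lines ≠ [] (excluded by Pre_); when pattern ≠ [] each iteration adds at
-- least one element, so fuel = lines.length + 1 always suffices and only makes the port total.
def pvLoopA (n : Nat) (pattern : List String) : Nat → List String → List String
  | 0, acc => acc
  | fuel + 1, acc => if acc.length < n then pvLoopA n pattern fuel (acc ++ pattern) else acc

def zigzag_score (lines : List String) (pattern : List String) : Int :=
  let expected := pvLoopA lines.length pattern (lines.length + 1) []
  let expected := PySem.List.slice expected none (some (lines.length : Int))  -- expected[:len(lines)]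
  (PySem.List.pyRange 0 lines.length 1).foldl
    (fun score i =>
      if PySem.Str.lower (PySem.List.pyGetD lines i "") = PySem.List.pyGetD expected i ""
      then score + 1 else score - 1) 0

-- ===== PORT B =====
-- Python's 'while lines: … ; lines = lines[len(pattern):]'. It diverges iff pattern = [] and
-- lines ≠ [] (excluded by Pre_); when pattern ≠ [] each round shortens lines by at least one,
-- so fuel = lines.length + 1 always suffices and only makes the port total.
def pvLoopB (pattern : List String) : Nat → Int → List String → Int
  | 0, total, _ => total
  | fuel + 1, total, lines =>
    if lines = [] then total
    else
      pvLoopB pattern fuel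
        ((lines.zip pattern).foldl
          (fun t ab => if PySem.Str.lower ab.1 = ab.2 then t + 1 else t - 1) total)
        (PySem.List.slice lines (some (pattern.length : Int)) none)  -- lines[len(pattern):]

def zigzag_score_alt (lines : List String) (pattern : List String) : Int :=
  pvLoopB pattern (lines.length + 1) 0 lines

-- ===== PRECONDITION & SPEC =====
-- Pre_ excludes pattern = [] with lines ≠ [], where both Pythons diverge (A's while-loop never
-- fills 'expected'; B's while-loop never shortens 'lines') — A returns on everything else.
def Pre_zigzag_score (lines : List String) (pattern : List String) : Prop :=
  pattern ≠ [] ∨ lines = []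
instance (lines : List String) (pattern : List String) : Decidable (Pre_zigzag_score lines pattern) := by unfold Pre_zigzag_score; infer_instance

def pvWitness_zigzag_score : List String × List String := (["Left", "right", "LEFT"], ["left", "right"])

def Spec_zigzag_score (lines : List String) (pattern : List String) (out : Int) : Prop := out = zigzag_score_alt lines pattern
instance (lines : List String) (pattern : List String) (out : Int) : Decidable (Spec_zigzag_score lines pattern out) := by unfold Spec_zigzag_score; infer_instance

-- ===== CLAIM =====
def Claim_equal_zigzag_score : Prop := ∀ (lines : List String) (pattern : List String), Dom_zigzag_score lines pattern → Pre_zigzag_score lines pattern → Spec_zigzag_score lines pattern (zigzag_score lines pattern)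

-- ===== LEMMAS AND PROOFS =====

-- a ±1-accumulating fold is init + sum of the mapped ±1 weights
lemma foldl_pm {α : Type} (c : α → Prop) [DecidablePred c] :
    ∀ (l : List α) (init : Int),
      l.foldl (fun s x => if c x then s + 1 else s - 1) init
        = init + (l.map (fun x => if c x then (1 : Int) else -1)).sum := by
  intro l
  induction l with
  | nil => intro init; simp
  | cons a t ih =>
    intro init
    simp only [List.foldl_cons, List.map_cons, List.sum_cons, ih]
    by_cases h : c a <;> simp [h] <;> ring

-- zipping against an appended list splits at the length of the first part
lemma zip_append_right {α β : Type} :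
    ∀ (ys : List β) (xs : List α) (zs : List β),
      xs.zip (ys ++ zs) = (xs.take ys.length).zip ys ++ (xs.drop ys.length).zip zs := by
  intro ys
  induction ys with
  | nil => intro xs zs; simp
  | cons y ys ih =>
    intro xs zs
    cases xs with
    | nil => simp
    | cons x xs => simp [List.zip_cons_cons, ih]

-- zip already truncates: pre-truncating either side changes nothing
lemma zip_take_left {α β : Type} :
    ∀ (ys : List β) (xs : List α), (xs.take ys.length).zip ys = xs.zip ys := by
  intro ys
  induction ys with
  | nil => intro xs; simp
  | cons y ys ih =>
    intro xs
    cases xs with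
    | nil => simp
    | cons x xs => simp [List.zip_cons_cons, ih]

lemma zip_take_right {α β : Type} :
    ∀ (xs : List α) (ys : List β), xs.zip (ys.take xs.length) = xs.zip ys := by
  intro xs
  induction xs with
  | nil => intro ys; simp
  | cons x xs ih =>
    intro ys
    cases ys with
    | nil => simp
    | cons y ys => simp [List.zip_cons_cons, ih]

-- A's build loop reaches length ≥ min n (start + fuel)
lemma pvLoopA_len (n : Nat) (p : List String) (hp : p ≠ []) :
    ∀ (fuel : Nat) (acc : List String),
      min n (acc.length + fuel) ≤ (pvLoopA n p fuel acc).length := by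
  intro fuel
  induction fuel with
  | zero => intro acc; simp [pvLoopA]
  | succ f ih =>
    intro acc
    have hL : 1 ≤ p.length := by
      cases p with
      | nil => exact absurd rfl hp
      | cons a t => simp
    by_cases h : acc.length < n
    · simp only [pvLoopA, if_pos h]
      have : min n (acc.length + p.length + f) ≤ (pvLoopA n p f (acc ++ p)).length := by
        simpa [List.length_append] using ih (acc ++ p)
      omega
    · simp only [pvLoopA, if_neg h]
      omega

-- A's build loop only ever appends whole copies of the pattern
lemma pvLoopA_rep (n : Nat) (p : List String) :
    ∀ (fuel k : Nat), ∃ m,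
      pvLoopA n p fuel ((List.replicate k p).flatten) = (List.replicate m p).flatten := by
  intro fuel
  induction fuel with
  | zero => intro k; exact ⟨k, rfl⟩
  | succ f ih =>
    intro k
    by_cases h : ((List.replicate k p).flatten).length < n
    · obtain ⟨m, hm⟩ := ih (k + 1)
      refine ⟨m, ?_⟩
      simp only [pvLoopA, if_pos h]
      rw [← hm, List.replicate_succ' (n := k), List.flatten_append]
      simp
    · exact ⟨k, by simp only [pvLoopA, if_neg h]⟩

lemma flatten_replicate_length (p : List String) (m : Nat) :
    ((List.replicate m p).flatten).length = m * p.length := by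
  induction m with
  | zero => simp
  | succ m ih => simp [List.replicate_succ, ih, Nat.succ_mul]; ring

-- B's while-loop computes total + Σ pvPM over lines zipped with enough copies of the pattern
lemma pvLoopB_sum (p : List String) (hp : p ≠ []) :
    ∀ (fuel m : Nat) (lines : List String) (t : Int),
      lines.length < fuel → lines.length ≤ m * p.length →
      pvLoopB p fuel t lines
        = t + ((lines.zip ((List.replicate m p).flatten)).map
            (fun ab => if PySem.Str.lower ab.1 = ab.2 then (1 : Int) else -1)).sum := by
  intro fuel
  induction fuel with
  | zero => intro m lines t h1 _; omega
  | succ f ih =>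
    intro m lines t h1 h2
    by_cases hl : lines = []
    · subst hl; simp [pvLoopB]
    · have hL : 1 ≤ p.length := by
        cases p with
        | nil => exact absurd rfl hp
        | cons a tl => simp
      have hlen : 0 < lines.length := List.length_pos_iff.mpr hl
      obtain ⟨m', rfl⟩ : ∃ m', m = m' + 1 := by
        cases m with
        | zero => omega
        | succ m' => exact ⟨m', rfl⟩
      have hd1 : (lines.drop p.length).length < f := by rw [List.length_drop]; omega
      have hd2 : (lines.drop p.length).length ≤ m' * p.length := by
        rw [List.length_drop]; rw [Nat.succ_mul] at h2; omega
      simp only [pvLoopB, if_neg hl]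
      rw [PySem.List.slice_from_natCast,
        foldl_pm (c := fun ab : String × String => PySem.Str.lower ab.1 = ab.2),
        ih m' (lines.drop p.length) _ hd1 hd2]
      rw [List.replicate_succ, List.flatten_cons, zip_append_right p lines _,
        zip_take_left, List.map_append, List.sum_append]
      ring

-- elementwise lookup in a zip
lemma zip_getD {α β : Type} [Inhabited α] [Inhabited β]
    (xs : List α) (ys : List β) (k : Nat) (d1 : α) (d2 : β)
    (h1 : k < xs.length) (h2 : k < ys.length) :
    (xs.zip ys).getD k (d1, d2) = (xs.getD k d1, ys.getD k d2) := by
  have hz : k < (xs.zip ys).length := by simp [List.length_zip]; omega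
  rw [List.getD_eq_getElem _ _ hz, List.getD_eq_getElem _ _ h1, List.getD_eq_getElem _ _ h2]
  exact List.getElem_zip

-- ===== VERDICT =====
theorem zigzag_score_spec : Claim_equal_zigzag_score := by
  intro lines pattern _ hpre
  unfold Spec_zigzag_score
  rcases eq_or_ne lines [] with hl | hl
  · subst hl
    simp [zigzag_score, zigzag_score_alt, pvLoopA, pvLoopB, PySem.List.pyRange_one_eq_nil,
      PySem.List.slice]
  · have hp : pattern ≠ [] := by
      rcases hpre with h | h
      · exact h
      · exact absurd h hl
    have hL : 1 ≤ pattern.length := by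
      cases pattern with
      | nil => exact absurd rfl hp
      | cons a tl => simp
    -- the table A builds is m whole copies of the pattern, long enough
    obtain ⟨m, hm⟩ := pvLoopA_rep lines.length pattern (lines.length + 1) 0
    simp only [List.replicate_zero, List.flatten_nil] at hm
    have htab : lines.length ≤ ((List.replicate m pattern).flatten).length := by
      have := pvLoopA_len lines.length pattern hp (lines.length + 1) []
      rw [hm] at this; omega
    have hmul : lines.length ≤ m * pattern.length := by
      rwa [flatten_replicate_length] at htab
    -- name A's truncated expected table
    set table := (List.replicate m pattern).flatten with htabdef
    have hexp : PySem.List.slice (pvLoopA lines.length pattern (lines.length + 1) []) none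
        (some (lines.length : Int)) = table.take lines.length := by
      rw [hm, PySem.List.slice_to_natCast]
    -- A's indexed fold = fold over the zip of lines with the table
    simp only [zigzag_score, hexp]
    have hzt : lines.zip (table.take lines.length) = lines.zip table := zip_take_right lines _
    have hlenE : (table.take lines.length).length = lines.length := by
      simp [List.length_take]; omega
    have hzlen : (lines.zip (table.take lines.length)).length = lines.length := by
      simp [List.length_zip, hlenE]
    have hcongr :
        (PySem.List.pyRange 0 lines.length 1).foldl
          (fun score i =>
            if PySem.Str.lower (PySem.List.pyGetD lines i "")
                = PySem.List.pyGetD (table.take lines.length) i ""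
            then score + 1 else score - 1) 0
        = (PySem.List.pyRange 0 lines.length 1).foldl
          (fun score i =>
            (fun (s : Int) (ab : String × String) =>
              if PySem.Str.lower ab.1 = ab.2 then s + 1 else s - 1) score
              (PySem.List.pyGetD (lines.zip (table.take lines.length)) i ("", ""))) 0 := by
      refine PySem.List.foldl_congr_mem _ _ _ _ ?_
      intro acc i hi
      obtain ⟨h0, hn⟩ := (PySem.List.mem_pyRange_one).1 hi
      obtain ⟨k, rfl⟩ : ∃ k : Nat, i = (k : Int) := ⟨i.toNat, (Int.toNat_of_nonneg h0).symm⟩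
      have hk : k < lines.length := by exact_mod_cast hn
      rw [PySem.List.pyGetD_natCast, PySem.List.pyGetD_natCast, PySem.List.pyGetD_natCast,
        zip_getD lines (table.take lines.length) k "" "" hk (by omega)]
    rw [hcongr]
    have := PySem.List.foldl_pyRange_zero_pyGetD' (lines.zip (table.take lines.length)) ("", "")
      (fun (s : Int) (ab : String × String) =>
        if PySem.Str.lower ab.1 = ab.2 then s + 1 else s - 1) 0
    rw [hzlen] at this
    rw [this, hzt,
      foldl_pm (c := fun ab : String × String => PySem.Str.lower ab.1 = ab.2)]
    -- B's loop computes the same sum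
    rw [zigzag_score_alt, pvLoopB_sum pattern hp (lines.length + 1) m lines 0 (by omega) hmul]
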